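-- pv_equiv track=rewrite | github.com/Tianyi-Billy-Ma/N-MARS | src/n_mars/eval/nmars_filter.py | _text_stack_postprocess
-- ===== SOURCE A (Python) =====
-- UNDO_TOKEN = "<UNDO>"
--
-- def _text_stack_postprocess(text: str, undo_token: str = UNDO_TOKEN) -> str:
--     """Apply stack-based post-processing to a decoded text string.
--
--     Splits on whitespace, treats each ``undo_token`` occurrence as a pop
--     operation that removes the previous word from the stack.
--
--     Example:
--         "The answer is 5 <UNDO> 4" -> "The answer is 4"
--     """
--     words = text.split()
--     stack: list[str] = []
--     for word in words:
--         if word == undo_token: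
--             if stack:
--                 stack.pop()
--         else:
--             stack.append(word)
--     return " ".join(stack)
-- ===== SOURCE B (Python) =====
-- UNDO_TOKEN = "<UNDO>"
--
-- def _text_stack_postprocess(text: str, undo_token: str = UNDO_TOKEN) -> str:
--     # Reverse pass: no stack; count pending undo tokens and cancel them
--     # against the earlier words; surplus undos are harmless (counter > 0).
--     pending = 0
--     kept = []
--     for word in reversed(text.split()):
--         if word == undo_token:
--             pending += 1
--         elif pending:
--             pending -= 1
--         else:
--             kept.append(word)
--     return " ".join(reversed(kept))
-- ===== Notes on version B (the rewrite author's own statement) =====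
-- stated objective: alternative
-- what changed: Replaces the left-to-right word stack (append/pop) with a right-to-left scan that keeps only an integer counter of pending undo tokens and collects surviving words, so no stack is built or popped.
import Mathlib
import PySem

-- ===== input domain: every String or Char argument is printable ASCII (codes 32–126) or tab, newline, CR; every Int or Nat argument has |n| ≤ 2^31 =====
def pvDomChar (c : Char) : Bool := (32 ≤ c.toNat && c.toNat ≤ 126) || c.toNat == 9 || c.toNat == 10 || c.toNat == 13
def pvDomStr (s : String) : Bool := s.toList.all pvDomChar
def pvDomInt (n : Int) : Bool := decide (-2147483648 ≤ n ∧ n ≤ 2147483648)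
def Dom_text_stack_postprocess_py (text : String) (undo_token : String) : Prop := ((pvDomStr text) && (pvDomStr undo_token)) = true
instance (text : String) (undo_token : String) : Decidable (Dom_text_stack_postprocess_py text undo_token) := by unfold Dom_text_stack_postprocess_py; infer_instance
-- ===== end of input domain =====

-- B replaces A's left-to-right word stack by a right-to-left scan with a pending-undo counter (alternative decomposition, same cost).

-- ===== PORT A =====
-- A's loop body: push a word, or pop the stack (no-op when empty) on the undo token
def pvAStep (undo_token : String) (stack : List String) (word : String) : List String :=
  if word = undo_token then (if stack = [] then stack else stack.dropLast)
  else stack ++ [word]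

def text_stack_postprocess_py (text : String) (undo_token : String) : String :=
  let words := PySem.Str.split₀ text
  let stack := words.foldl (pvAStep undo_token) []
  PySem.Str.join " " stack

-- ===== PORT B =====
-- B's reversed-iteration loop, transliterated as structural recursion: the state
-- (pending, kept) after scanning the suffix `ws` right-to-left; exact for the
-- Python `for word in reversed(words)` loop (rightmost word is consumed first).
def pvRevScan (undo_token : String) : List String → Nat × List String
  | [] => (0, [])
  | word :: rest =>
      match pvRevScan undo_token rest with
      | (pending, kept) =>
          if word = undo_token then (pending + 1, kept)
          else if pending > 0 then (pending - 1, kept)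
          else (pending, kept ++ [word])

def text_stack_postprocess_py_alt (text : String) (undo_token : String) : String :=
  PySem.Str.join " " (pvRevScan undo_token (PySem.Str.split₀ text)).2.reverse

-- ===== PRECONDITION & SPEC =====
def Spec_text_stack_postprocess_py (text : String) (undo_token : String) (out : String) : Prop := out = text_stack_postprocess_py_alt text undo_token
instance (text : String) (undo_token : String) (out : String) : Decidable (Spec_text_stack_postprocess_py text undo_token out) := by unfold Spec_text_stack_postprocess_py; infer_instance

-- ===== CLAIM (what is proved, stated in full; the proofs are below) =====
def Claim_equal_text_stack_postprocess_py : Prop := ∀ (text : String) (undo_token : String), Dom_text_stack_postprocess_py text undo_token → Spec_text_stack_postprocess_py text undo_token (text_stack_postprocess_py text undo_token)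

-- ===== LEMMAS AND PROOFS =====

-- A's stack pop is List.dropLast even without the emptiness guard
theorem pvAStep_eq (u : String) (s : List String) (w : String) :
    pvAStep u s w = if w = u then s.dropLast else s ++ [w] := by
  unfold pvAStep
  split_ifs with h1 h2 <;> simp_all

-- key invariant: A's fold from any initial stack s equals s minus the pending
-- undos of B's reverse scan, followed by B's surviving words (reversed = in order)
theorem pvKey (u : String) : ∀ (ws : List String) (s : List String),
    ws.foldl (pvAStep u) s =
      s.take (s.length - (pvRevScan u ws).1) ++ (pvRevScan u ws).2.reverse := by
  intro ws
  induction ws with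
  | nil => intro s; simp [pvRevScan]
  | cons w t ih =>
    intro s
    simp only [List.foldl_cons]
    rcases hfold : pvRevScan u t with ⟨p, a⟩
    rw [ih (pvAStep u s w), hfold, pvAStep_eq]
    by_cases hw : w = u
    · -- undo token: pop on A's side, count on B's side
      simp only [hw, ite_true, pvRevScan, hfold]
      rw [List.dropLast_eq_take, List.take_take, List.length_take]
      congr 2
      omega
    · by_cases hp : p > 0
      · -- word cancelled by a later undo: A pushes it, B decrements pending
        simp only [if_neg hw, pvRevScan, hfold, if_pos hp, List.length_append,
          List.length_singleton]
        have hle : s.length + 1 - p ≤ s.length := by omega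
        rw [List.take_append_of_le_length hle]
        congr 2
        omega
      · -- surviving word
        have hp0 : p = 0 := by omega
        simp only [if_neg hw, pvRevScan, hfold, hp0, List.length_append]
        simp [List.take_append]

-- ===== VERDICT (by name: the statement is the Claim_ definition above) =====
theorem text_stack_postprocess_py_spec : Claim_equal_text_stack_postprocess_py := by
  intro text undo_token _
  unfold Spec_text_stack_postprocess_py text_stack_postprocess_py text_stack_postprocess_py_alt
  simp only []
  rw [pvKey]
  simp
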